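-- pv_equiv track=rewrite | github.com/Arashek/ADE-stable-1.0 | backend/services/core/workflow_manager.py | _generate_review_summary
-- ===== SOURCE A (Python) =====
-- from typing import Dict, List, Any, Optional
--
-- def _generate_review_summary(reviews: List[Dict[str, Any]]) -> Dict[str, Any]:
--     """Generate a summary of code reviews"""
--     total_issues = sum(len(r['issues']) for r in reviews)
--     critical_issues = sum(
--         len([i for i in r['issues'] if i['severity'] == 'critical'])
--         for r in reviews
--     )
--
--     return {
--         'total_files': len(reviews),
--         'total_issues': total_issues,
--         'critical_issues': critical_issues,
--         'files_with_issues': len([r for r in reviews if r['issues']])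
--     }
-- ===== SOURCE B (Python) =====
-- def _generate_review_summary(reviews):
--     """Generate a summary of code reviews by divide-and-conquer:
--     each single review maps to a (total, critical, with_issues) triple and
--     triples of the two halves are merged by componentwise addition."""
--     def summarize(lo, hi):
--         if hi - lo == 0:
--             return (0, 0, 0)
--         if hi - lo == 1:
--             issues = reviews[lo]['issues']
--             return (len(issues),
--                     sum(1 for i in issues if i['severity'] == 'critical'),
--                     1 if issues else 0)
--         mid = (lo + hi) // 2
--         a = summarize(lo, mid)
--         b = summarize(mid, hi)
--         return (a[0] + b[0], a[1] + b[1], a[2] + b[2])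
--
--     total, critical, with_issues = summarize(0, len(reviews))
--     return {
--         'total_files': len(reviews),
--         'total_issues': total,
--         'critical_issues': critical,
--         'files_with_issues': with_issues,
--     }
-- ===== Notes on version B (the rewrite author's own statement) =====
-- stated objective: alternative
-- what changed: Replaces A's four independent comprehension passes by a recursive divide-and-conquer: each review is mapped to a (total, critical, with_issues) triple and the triples of the two halves are merged by componentwise addition (a monoid reduction), which is correct because all three figures are additive over list concatenation.
import Mathlib
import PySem

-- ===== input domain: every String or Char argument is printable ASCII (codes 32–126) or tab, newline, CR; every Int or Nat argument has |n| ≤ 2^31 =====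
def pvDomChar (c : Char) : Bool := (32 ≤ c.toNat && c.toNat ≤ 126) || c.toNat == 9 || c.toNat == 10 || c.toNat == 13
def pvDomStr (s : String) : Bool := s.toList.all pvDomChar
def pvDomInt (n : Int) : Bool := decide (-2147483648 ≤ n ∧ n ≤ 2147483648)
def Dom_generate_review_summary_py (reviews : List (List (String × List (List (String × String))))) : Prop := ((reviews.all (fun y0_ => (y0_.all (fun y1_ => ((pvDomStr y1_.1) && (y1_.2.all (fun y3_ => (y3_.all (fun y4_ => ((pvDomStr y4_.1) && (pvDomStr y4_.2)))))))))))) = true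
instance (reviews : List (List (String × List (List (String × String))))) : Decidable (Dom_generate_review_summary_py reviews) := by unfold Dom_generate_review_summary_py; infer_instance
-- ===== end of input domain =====

-- B computes the three issue figures by divide-and-conquer (per-review triples merged by
-- componentwise addition over halves) instead of A's four independent comprehension passes;
-- equal because all three figures are additive over list concatenation.
-- Dict lookup r['issues'] / i['severity'] is first-match List.lookup; Pre_ excludes the
-- KeyError inputs, so the `.getD` defaults are never taken on admitted inputs.

-- ===== PORT A =====
def generate_review_summary_py (reviews : List (List (String × List (List (String × String))))) : List (String × Int) :=
  let total_issues : Int :=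
    (reviews.map (fun r => (((List.lookup "issues" r).getD []).length : Int))).sum
  let critical_issues : Int :=
    (reviews.map (fun r =>
      ((((List.lookup "issues" r).getD []).filter
          (fun i => (List.lookup "severity" i).getD "" == "critical")).length : Int))).sum
  [("total_files", (reviews.length : Int)),
   ("total_issues", total_issues),
   ("critical_issues", critical_issues),
   ("files_with_issues",
     ((reviews.filter (fun r => !((List.lookup "issues" r).getD []).isEmpty)).length : Int))]

-- ===== PORT B =====
-- summarize(lo, hi) from Source B, ported on the sublist reviews[lo:hi] directly
def pvDC : List (List (String × List (List (String × String)))) → Int × Int × Int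
  | [] => (0, 0, 0)
  | [r] =>
      -- issues = r['issues'] (inlined local)
      ((((List.lookup "issues" r).getD []).length : Int),
       ((List.lookup "issues" r).getD []).foldl
         (fun c i => if (List.lookup "severity" i).getD "" == "critical" then c + 1 else c) 0,
       if ((List.lookup "issues" r).getD []).isEmpty then 0 else 1)
  | x :: y :: rest =>
      -- mid = len(xs)//2; a = summarize(left half); b = summarize(right half)
      ((pvDC ((x :: y :: rest).take ((x :: y :: rest).length / 2))).1 +
         (pvDC ((x :: y :: rest).drop ((x :: y :: rest).length / 2))).1,
       (pvDC ((x :: y :: rest).take ((x :: y :: rest).length / 2))).2.1 +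
         (pvDC ((x :: y :: rest).drop ((x :: y :: rest).length / 2))).2.1,
       (pvDC ((x :: y :: rest).take ((x :: y :: rest).length / 2))).2.2 +
         (pvDC ((x :: y :: rest).drop ((x :: y :: rest).length / 2))).2.2)
termination_by xs => xs.length
decreasing_by
  · simp [List.length_take]; omega
  · simp [List.length_drop]; omega

def generate_review_summary_py_alt (reviews : List (List (String × List (List (String × String))))) : List (String × Int) :=
  let s := pvDC reviews
  [("total_files", (reviews.length : Int)),
   ("total_issues", s.1),
   ("critical_issues", s.2.1),
   ("files_with_issues", s.2.2)]

-- ===== PRECONDITION & SPEC =====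
-- Pre_ excludes exactly the inputs where Python A raises KeyError: a review without an
-- 'issues' key, or an issue dict without a 'severity' key.
def Pre_generate_review_summary_py (reviews : List (List (String × List (List (String × String))))) : Prop :=
  (reviews.all (fun r =>
    (List.lookup "issues" r).isSome &&
    ((List.lookup "issues" r).getD []).all (fun i => (List.lookup "severity" i).isSome))) = true
instance (reviews : List (List (String × List (List (String × String))))) : Decidable (Pre_generate_review_summary_py reviews) := by unfold Pre_generate_review_summary_py; infer_instance

def pvWitness_generate_review_summary_py : (List (List (String × List (List (String × String))))) :=
  [[("issues", [[("severity", "critical")], [("severity", "low")]])], [("issues", [])]]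

def Spec_generate_review_summary_py (reviews : List (List (String × List (List (String × String))))) (out : List (String × Int)) : Prop := out = generate_review_summary_py_alt reviews
instance (reviews : List (List (String × List (List (String × String))))) (out : List (String × Int)) : Decidable (Spec_generate_review_summary_py reviews out) := by unfold Spec_generate_review_summary_py; infer_instance

-- ===== CLAIM (what is proved, stated in full; the proofs are below) =====
def Claim_equal_generate_review_summary_py : Prop := ∀ (reviews : List (List (String × List (List (String × String))))), Dom_generate_review_summary_py reviews → Pre_generate_review_summary_py reviews → Spec_generate_review_summary_py reviews (generate_review_summary_py reviews)

-- ===== LEMMAS AND PROOFS =====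

-- the specification triple: the three figures A computes
def pvSpecTriple (xs : List (List (String × List (List (String × String))))) : Int × Int × Int :=
  ((xs.map (fun r => (((List.lookup "issues" r).getD []).length : Int))).sum,
   (xs.map (fun r =>
      ((((List.lookup "issues" r).getD []).filter
          (fun i => (List.lookup "severity" i).getD "" == "critical")).length : Int))).sum,
   ((xs.filter (fun r => !((List.lookup "issues" r).getD []).isEmpty)).length : Int))

theorem pv_inner_count (issues : List (List (String × String))) (c : Int) :
    issues.foldl (fun c i => if (List.lookup "severity" i).getD "" == "critical" then c + 1 else c) c
      = c + ((issues.filter (fun i => (List.lookup "severity" i).getD "" == "critical")).length : Int) := by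
  induction issues generalizing c with
  | nil => simp
  | cons i is ih =>
    simp only [List.foldl_cons, List.filter_cons, ih]
    split
    · simp; omega
    · simp

theorem pv_spec_append (as bs : List (List (String × List (List (String × String))))) :
    pvSpecTriple (as ++ bs) =
      ((pvSpecTriple as).1 + (pvSpecTriple bs).1,
       (pvSpecTriple as).2.1 + (pvSpecTriple bs).2.1,
       (pvSpecTriple as).2.2 + (pvSpecTriple bs).2.2) := by
  simp [pvSpecTriple, List.filter_append]

theorem pv_dc_eq (xs : List (List (String × List (List (String × String))))) :
    pvDC xs = pvSpecTriple xs := by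
  fun_induction pvDC xs with
  | case1 => simp [pvSpecTriple]
  | case2 r =>
    rw [pv_inner_count]
    by_cases h : ((List.lookup "issues" r).getD ([] : List (List (String × String)))).isEmpty <;>
      simp [pvSpecTriple, h]
  | case3 x y rest ih1 ih2 =>
    rw [ih1, ih2]
    conv_rhs => rw [← List.take_append_drop ((x :: y :: rest).length / 2) (x :: y :: rest)]
    rw [pv_spec_append]

-- ===== VERDICT (by name: the statement is the Claim_ definition above) =====
theorem generate_review_summary_py_spec : Claim_equal_generate_review_summary_py := by
  intro reviews _ _
  simp [Spec_generate_review_summary_py, generate_review_summary_py, generate_review_summary_py_alt,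
    pv_dc_eq, pvSpecTriple]
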